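-- pv_equiv track=rewrite | github.com/jasonscharff/ATCS-PythonCalculator | mainDoc.py | findSegmentEndWithSpaces
-- ===== SOURCE A (Python) =====
-- def findSegmentEndWithSpaces(string):
--     terminators = '+-/*^() '
--     for i in range (0, len(string)):
--         if string[i] in terminators:
--             if(string[i] == " "):
--                 if followedByFraction(string[i+1:]):
--                     return i
--             else:
--                 return i
--
--     return len(string)
--
-- def followedByFraction(string):
--     terminators = '+-/*^() '
--     for i in range (0, len(string)):
--         if string[i] in terminators:
--             return False
--         elif string[i] == "\\":
--             return True
--     return False
-- ===== SOURCE B (Python) =====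
-- def firstIn(s, allowed):
--     for i in range(len(s)):
--         if s[i] in allowed:
--             return i
--     return len(s)
--
-- def lastIn(s, ch):
--     r = -1
--     for i in range(len(s)):
--         if s[i] == ch:
--             r = i
--     return r
--
-- def findSegmentEndWithSpaces(string):
--     t = firstIn(string, '+-/*^()')      # first hard (non-space) terminator, else len
--     head = string[:t]
--     sp = firstIn(head, ' ')             # first space before any hard terminator
--     if sp == len(head):
--         return t
--     b = sp + 1 + firstIn(head[sp + 1:], '\\')   # first backslash after that space
--     if b == len(head):
--         return t
--     return lastIn(head[:b], ' ')        # last space before that backslash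
-- ===== Notes on version B (the rewrite author's own statement) =====
-- stated objective: alternative
-- what changed: Replaced the outer character loop with its followedByFraction rescanning helper by staged passes: find the first hard terminator, then the first space before it, then the first backslash after that space, and finally the last space before that backslash.
import Mathlib
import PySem

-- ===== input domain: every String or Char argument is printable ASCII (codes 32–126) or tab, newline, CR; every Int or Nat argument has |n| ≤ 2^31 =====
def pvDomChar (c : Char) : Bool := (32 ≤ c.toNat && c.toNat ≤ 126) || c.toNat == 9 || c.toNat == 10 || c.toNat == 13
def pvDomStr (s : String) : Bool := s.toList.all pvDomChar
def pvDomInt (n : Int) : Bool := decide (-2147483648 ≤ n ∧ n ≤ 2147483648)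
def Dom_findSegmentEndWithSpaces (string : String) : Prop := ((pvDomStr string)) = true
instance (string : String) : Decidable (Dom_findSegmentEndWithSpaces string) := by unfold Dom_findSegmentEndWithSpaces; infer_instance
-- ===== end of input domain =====

-- B replaces A's outer loop + followedByFraction rescanning helper by staged passes
-- (first hard terminator, first space before it, first backslash after that space,
-- last space before that backslash); objective: alternative decomposition.

-- ===== PORT A =====
-- the constant `terminators = '+-/*^() '` as a list of chars
def pvTerminators : List Char := ['+', '-', '/', '*', '^', '(', ')', ' ']

def followedByFraction : List Char → Bool
  | [] => false
  | c :: rest =>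
    if pvTerminators.contains c then false
    else if c = '\\' then true
    else followedByFraction rest

-- the for-loop over i in range(0, len(string)) reading string[i]; i carried explicitly
def pvGoA : List Char → Int → Int
  | [], i => i
  | c :: rest, i =>
    if pvTerminators.contains c then
      if c = ' ' then
        if followedByFraction rest then i else pvGoA rest (i + 1)
      else i
    else pvGoA rest (i + 1)

def findSegmentEndWithSpaces (string : String) : Int := pvGoA string.toList 0

-- ===== PORT B =====
-- the non-space terminators '+-/*^()'
def pvHard : List Char := ['+', '-', '/', '*', '^', '(', ')']

-- firstIn(s, allowed): index of first char of s in allowed, else len(s)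
def pvFirstIn : List Char → List Char → Nat
  | [], _ => 0
  | c :: xs, a => if a.contains c then 0 else 1 + pvFirstIn xs a

-- lastIn(s, ch): the forward loop keeping the last matching index (-1 if none)
def pvLastGo : List Char → Char → Int → Int → Int
  | [], _, _, r => r
  | c :: xs, ch, i, r => pvLastGo xs ch (i + 1) (if c = ch then i else r)

def pvLastIn (l : List Char) (ch : Char) : Int := pvLastGo l ch 0 (-1)

-- the slices string[:t], head[sp+1:], head[:b] have in-range nonnegative bounds,
-- so List.take / List.drop are exact here
def pvStaged (l : List Char) : Int :=
  let t := pvFirstIn l pvHard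
  let head := l.take t
  let sp := pvFirstIn head [' ']
  if sp = head.length then (t : Int)
  else
    let b := sp + 1 + pvFirstIn (head.drop (sp + 1)) ['\\']
    if b = head.length then (t : Int)
    else pvLastIn (head.take b) ' '

def findSegmentEndWithSpaces_alt (string : String) : Int := pvStaged string.toList

-- ===== PRECONDITION & SPEC =====
def Spec_findSegmentEndWithSpaces (string : String) (out : Int) : Prop := out = findSegmentEndWithSpaces_alt string
instance (string : String) (out : Int) : Decidable (Spec_findSegmentEndWithSpaces string out) := by unfold Spec_findSegmentEndWithSpaces; infer_instance

-- ===== CLAIM (what is proved, stated in full; the proofs are below) =====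
def Claim_equal_findSegmentEndWithSpaces : Prop := ∀ (string : String), Dom_findSegmentEndWithSpaces string → Spec_findSegmentEndWithSpaces string (findSegmentEndWithSpaces string)

-- ===== LEMMAS AND PROOFS =====

-- characters: a terminator that is not a space is hard, and vice versa
theorem pv_term_char {c : Char} (h : pvTerminators.contains c = true) (hs : ¬ c = ' ') :
    pvHard.contains c = true := by
  simp [pvTerminators] at h
  simp [pvHard]
  tauto

theorem pv_hard_term {c : Char} (h : pvHard.contains c = true) :
    pvTerminators.contains c = true := by
  simp [pvHard] at h
  simp [pvTerminators]
  tauto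

theorem pv_term_not_hard {c : Char} (h : pvTerminators.contains c = true)
    (hh : ¬ pvHard.contains c = true) : c = ' ' := by
  simp [pvTerminators] at h
  simp [pvHard] at hh
  tauto

theorem contains_singleton (x y : Char) : ([y] : List Char).contains x = true ↔ x = y := by
  simp

-- unfolding of pvStaged with the lets expanded
theorem staged_eq (l : List Char) :
    pvStaged l =
      if pvFirstIn (l.take (pvFirstIn l pvHard)) [' '] = (l.take (pvFirstIn l pvHard)).length
      then (pvFirstIn l pvHard : Int)
      else if pvFirstIn (l.take (pvFirstIn l pvHard)) [' '] + 1 +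
              pvFirstIn ((l.take (pvFirstIn l pvHard)).drop
                (pvFirstIn (l.take (pvFirstIn l pvHard)) [' '] + 1)) ['\\'] =
              (l.take (pvFirstIn l pvHard)).length
      then (pvFirstIn l pvHard : Int)
      else pvLastIn ((l.take (pvFirstIn l pvHard)).take
            (pvFirstIn (l.take (pvFirstIn l pvHard)) [' '] + 1 +
              pvFirstIn ((l.take (pvFirstIn l pvHard)).drop
                (pvFirstIn (l.take (pvFirstIn l pvHard)) [' '] + 1)) ['\\'])) ' ' := rfl

-- basic facts about pvFirstIn
theorem firstIn_le_length (l a : List Char) : pvFirstIn l a ≤ l.length := by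
  induction l with
  | nil => simp [pvFirstIn]
  | cons c xs ih =>
    simp only [pvFirstIn, List.length_cons]
    split <;> omega

theorem firstIn_take (l : List Char) (a : List Char) :
    ∀ m, pvFirstIn (l.take m) a = min (pvFirstIn l a) m := by
  induction l with
  | nil => intro m; simp [pvFirstIn]
  | cons c xs ih =>
    intro m
    cases m with
    | zero => simp [pvFirstIn]
    | succ m =>
      simp only [List.take_succ_cons, pvFirstIn]
      by_cases hc : a.contains c = true
      · rw [if_pos hc, if_pos hc]; simp
      · rw [if_neg hc, if_neg hc, ih m]; omega

theorem firstIn_drop (l a : List Char) :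
    ∀ m, m ≤ pvFirstIn l a → pvFirstIn (l.drop m) a = pvFirstIn l a - m := by
  induction l with
  | nil => intro m h; simp [pvFirstIn]
  | cons c xs ih =>
    intro m h
    cases m with
    | zero => simp
    | succ m =>
      simp only [pvFirstIn] at h
      by_cases hc : a.contains c = true
      · rw [if_pos hc] at h; omega
      · rw [if_neg hc] at h
        simp only [List.drop_succ_cons, pvFirstIn]
        rw [if_neg hc, ih m (by omega)]
        omega

theorem firstIn_mono (l a a' : List Char)
    (h : ∀ c, a.contains c = true → a'.contains c = true) :
    pvFirstIn l a' ≤ pvFirstIn l a := by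
  induction l with
  | nil => simp [pvFirstIn]
  | cons c xs ih =>
    simp only [pvFirstIn]
    by_cases hc : a.contains c = true
    · rw [if_pos hc, if_pos (h c hc)]
    · rw [if_neg hc]
      by_cases hc' : a'.contains c = true
      · rw [if_pos hc']; omega
      · rw [if_neg hc']; omega

theorem firstIn_le_of_getD (l a : List Char) :
    ∀ i, i < l.length → a.contains (l.getD i '?') = true → pvFirstIn l a ≤ i := by
  induction l with
  | nil => intro i h; simp at h
  | cons c xs ih =>
    intro i hi hc
    cases i with
    | zero =>
      simp only [List.getD_cons_zero] at hc
      simp only [pvFirstIn]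
      rw [if_pos hc]
    | succ i =>
      simp only [List.getD_cons_succ] at hc
      simp only [pvFirstIn]
      by_cases hcc : a.contains c = true
      · rw [if_pos hcc]; omega
      · rw [if_neg hcc]
        have := ih i (by simpa using Nat.lt_of_succ_lt_succ hi) hc
        omega

theorem getD_firstIn (l a : List Char) (h : pvFirstIn l a < l.length) :
    a.contains (l.getD (pvFirstIn l a) '?') = true := by
  induction l with
  | nil => simp [pvFirstIn] at h
  | cons c xs ih =>
    simp only [pvFirstIn] at h ⊢
    by_cases hc : a.contains c = true
    · rw [if_pos hc] at h ⊢
      simpa using hc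
    · rw [if_neg hc] at h ⊢
      have hlt : pvFirstIn xs a < xs.length := by simp at h; omega
      have h1 : (1 + pvFirstIn xs a) = pvFirstIn xs a + 1 := by omega
      rw [h1]
      simpa using ih hlt

theorem getD_take (l : List Char) : ∀ m i, i < m → (l.take m).getD i '?' = l.getD i '?' := by
  induction l with
  | nil => intro m i _; simp
  | cons c xs ih =>
    intro m i him
    cases m with
    | zero => omega
    | succ m =>
      cases i with
      | zero => simp
      | succ i => simpa using ih m i (by omega)

theorem mem_of_getD (l : List Char) :
    ∀ i, i < l.length → l.getD i '?' ∈ l := by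
  induction l with
  | nil => intro i h; simp at h
  | cons c xs ih =>
    intro i hi
    cases i with
    | zero => simp
    | succ i =>
      simp only [List.getD_cons_succ]
      exact List.mem_cons_of_mem _ (ih i (by simpa using Nat.lt_of_succ_lt_succ hi))

theorem getD_of_mem (l : List Char) {c : Char} (h : c ∈ l) :
    ∃ i, i < l.length ∧ l.getD i '?' = c := by
  induction l with
  | nil => simp at h
  | cons d xs ih =>
    rcases List.mem_cons.mp h with h | h
    · exact ⟨0, by simp, by simp [h.symm]⟩
    · rcases ih h with ⟨i, hi, he⟩
      exact ⟨i + 1, by simpa using Nat.succ_lt_succ hi, by simpa using he⟩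

-- followedByFraction holds iff the first backslash precedes the first terminator
theorem fbf_iff (l : List Char) :
    followedByFraction l = true ↔ pvFirstIn l ['\\'] < pvFirstIn l pvTerminators := by
  induction l with
  | nil => simp [followedByFraction, pvFirstIn]
  | cons c xs ih =>
    simp only [followedByFraction, pvFirstIn]
    by_cases ht : pvTerminators.contains c = true
    · have hbs : ¬ c = '\\' := by
        intro h
        rw [h] at ht
        exact absurd ht (by decide)
      have hb : ¬ ((['\\'] : List Char).contains c = true) := by
        simpa using hbs
      rw [if_pos ht, if_neg hb, if_pos ht]
      simp
    · by_cases hbs : c = '\\'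
      · have hb : (['\\'] : List Char).contains c = true := by simp [hbs]
        rw [if_neg ht, if_pos hbs, if_pos hb, if_neg ht]
        simp
      · have hb : ¬ ((['\\'] : List Char).contains c = true) := by simpa using hbs
        rw [if_neg ht, if_neg hbs, if_neg hb, if_neg ht, ih]
        omega

-- the last-index loop computed via the relative last index
def lastRel (ch : Char) : List Char → Option Nat
  | [] => none
  | c :: xs =>
    match lastRel ch xs with
    | some m => some (m + 1)
    | none => if c = ch then some 0 else none

theorem lastGo_eq (ch : Char) (l : List Char) :
    ∀ i r, pvLastGo l ch i r = match lastRel ch l with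
      | some m => i + (m : Int)
      | none => r := by
  induction l with
  | nil => intro i r; simp [pvLastGo, lastRel]
  | cons c xs ih =>
    intro i r
    simp only [pvLastGo, lastRel]
    rw [ih]
    cases hx : lastRel ch xs with
    | some m => simp; ring
    | none =>
      by_cases hc : c = ch <;> simp [hc]

theorem lastRel_eq_none (ch : Char) (l : List Char) :
    lastRel ch l = none ↔ ch ∉ l := by
  induction l with
  | nil => simp [lastRel]
  | cons c xs ih =>
    simp only [lastRel]
    cases hx : lastRel ch xs with
    | some m =>
      simp only [List.mem_cons]
      constructor
      · intro h; exact absurd h (by simp)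
      · intro h
        exact absurd ((not_or.mp h).2) (by rw [← ih, hx]; simp)
    | none =>
      by_cases hc : c = ch
      · simp [hc]
      · have h2 : ¬ ch = c := fun h => hc h.symm
        simp [hc, List.mem_cons, h2, ← ih, hx]

-- Key case: a leading hard terminator
theorem staged_hard (c : Char) (r : List Char) (hc : pvHard.contains c = true) :
    pvStaged (c :: r) = 0 := by
  rw [staged_eq]
  have ht : pvFirstIn (c :: r) pvHard = 0 := by
    simp only [pvFirstIn]; rw [if_pos hc]
  rw [ht]
  simp [pvFirstIn]

-- Key case: a leading space
theorem staged_space (r : List Char) :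
    pvStaged (' ' :: r) = if followedByFraction r then 0 else 1 + pvStaged r := by
  have hhard_sp : ¬ (pvHard.contains ' ' = true) := by decide
  rw [staged_eq (' ' :: r), staged_eq r]
  have ht1 : pvFirstIn (' ' :: r) pvHard = pvFirstIn r pvHard + 1 := by
    simp only [pvFirstIn]; rw [if_neg hhard_sp]; omega
  rw [ht1, List.take_succ_cons]
  set n := pvFirstIn r pvHard with hn
  set H := List.take n r with hH
  have hnlen : n ≤ r.length := firstIn_le_length r pvHard
  have hHlen : H.length = n := by rw [hH]; simp; omega
  have hsp0 : pvFirstIn (' ' :: H) [' '] = 0 := by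
    simp only [pvFirstIn]; rw [if_pos (by decide)]
  rw [hsp0, List.drop_succ_cons, List.drop_zero]
  set k := pvFirstIn H ['\\'] with hk
  set j := pvFirstIn H [' '] with hj
  set q := pvFirstIn (H.drop (j + 1)) ['\\'] with hq
  have hkmin : k = min (pvFirstIn r ['\\']) n := by
    have := firstIn_take r ['\\'] n
    rw [← hH] at this
    rw [hk, this]
  have hkn : k ≤ n := by omega
  have htm_le : pvFirstIn r pvTerminators ≤ n :=
    firstIn_mono r pvHard pvTerminators (fun c hc => pv_hard_term hc)
  have hc1 : ¬ (0 = (' ' :: H).length) := by simp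
  rw [if_neg hc1]
  -- a terminator strictly before n is a space, hence j is small
  have hsp_of_tm : pvFirstIn r pvTerminators < n → j ≤ pvFirstIn r pvTerminators := by
    intro htm
    have html : pvFirstIn r pvTerminators < r.length := by omega
    have h1 : pvTerminators.contains (r.getD (pvFirstIn r pvTerminators) '?') = true :=
      getD_firstIn r pvTerminators html
    have h2 : ¬ pvHard.contains (r.getD (pvFirstIn r pvTerminators) '?') = true := by
      intro hcon
      have := firstIn_le_of_getD r pvHard (pvFirstIn r pvTerminators) html hcon
      omega
    have hsp : r.getD (pvFirstIn r pvTerminators) '?' = ' ' := pv_term_not_hard h1 h2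
    apply firstIn_le_of_getD H [' '] (pvFirstIn r pvTerminators) (by omega)
    rw [hH, getD_take r n (pvFirstIn r pvTerminators) htm, hsp]
    decide
  cases hf : followedByFraction r with
  | true =>
    rw [if_pos rfl]
    have hbktm : pvFirstIn r ['\\'] < pvFirstIn r pvTerminators := (fbf_iff r).mp hf
    have hkr : k = pvFirstIn r ['\\'] := by omega
    have hkn' : k < n := by omega
    have hc2 : ¬ (0 + 1 + k = (' ' :: H).length) := by
      simp only [List.length_cons, hHlen]; omega
    rw [if_neg hc2]
    have ht : (0 : ℕ) + 1 + k = k + 1 := by omega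
    rw [ht, List.take_succ_cons]
    have hnosp : ' ' ∉ H.take k := by
      intro hmem
      rcases getD_of_mem _ hmem with ⟨s, hs, he⟩
      have hsk : s < k := by
        have := List.length_take_le k H
        omega
      rw [getD_take H k s hsk, hH, getD_take r n s (by omega)] at he
      have : pvFirstIn r pvTerminators ≤ s := by
        apply firstIn_le_of_getD r pvTerminators s (by omega)
        rw [he]; decide
      omega
    simp [pvLastIn, lastGo_eq, lastRel, (lastRel_eq_none ' ' (H.take k)).mpr hnosp]
  | false =>
    rw [if_neg (show ¬ (false = true) by simp)]
    have hbktm : pvFirstIn r pvTerminators ≤ pvFirstIn r ['\\'] := by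
      by_contra hcon
      rw [(fbf_iff r).mpr (by omega)] at hf
      exact absurd hf (by simp)
    by_cases hjn : j = H.length
    · -- no space before the first hard terminator: there is no early backslash either
      have hkeq : k = n := by
        by_contra hne
        have hkn' : k < n := by omega
        have hkr : k = pvFirstIn r ['\\'] := by omega
        have htm : pvFirstIn r pvTerminators < n := by omega
        have := hsp_of_tm htm
        omega
      rw [if_pos hjn]
      have hc2 : (0 + 1 + k = (' ' :: H).length) := by
        simp only [List.length_cons, hHlen]; omega
      rw [if_pos hc2]
      push_cast; omega
    · rw [if_neg hjn]
      have hjlt : j < n := by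
        have := firstIn_le_length H [' ']
        omega
      have hjk : j + 1 ≤ k := by
        by_cases hkeq : k = n
        · omega
        · have hkn' : k < n := by omega
          have hkr : k = pvFirstIn r ['\\'] := by omega
          have htm : pvFirstIn r pvTerminators < n := by omega
          have hjtm : j ≤ pvFirstIn r pvTerminators := hsp_of_tm htm
          have hjk' : j ≤ k := by omega
          -- j ≠ k because H[j] is a space and H[k] a backslash
          have hHj : H.getD j '?' = ' ' := by
            have := getD_firstIn H [' '] (by omega)
            rwa [contains_singleton] at this
          have hHk : H.getD k '?' = '\\' := by
            have := getD_firstIn H ['\\'] (by omega)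
            rwa [contains_singleton] at this
          have : ¬ j = k := by
            intro hcon
            rw [hcon, hHk] at hHj
            exact absurd hHj (by decide)
          omega
      have hqv : q = k - (j + 1) := by
        rw [hq]
        exact firstIn_drop H ['\\'] (j + 1) (by omega)
      have hbk : j + 1 + q = k := by omega
      by_cases hkeq : k = n
      · have hcr : j + 1 + q = H.length := by omega
        rw [if_pos hcr]
        have hc2 : (0 + 1 + k = (' ' :: H).length) := by
          simp only [List.length_cons, hHlen]; omega
        rw [if_pos hc2]
        push_cast; omega
      · have hkn' : k < n := by omega
        have hcr : ¬ (j + 1 + q = H.length) := by omega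
        rw [if_neg hcr]
        have hc2 : ¬ (0 + 1 + k = (' ' :: H).length) := by
          simp only [List.length_cons, hHlen]; omega
        rw [if_neg hc2]
        have ht : (0 : ℕ) + 1 + k = k + 1 := by omega
        rw [ht, List.take_succ_cons, hbk]
        have hHj : H.getD j '?' = ' ' := by
          have := getD_firstIn H [' '] (by omega)
          rwa [contains_singleton] at this
        have hsp_mem : ' ' ∈ H.take k := by
          have hlen2 : j < (H.take k).length := by
            simp [hHlen]; omega
          have := mem_of_getD (H.take k) j hlen2
          rwa [getD_take H k j (by omega), hHj] at this
        rcases hx : lastRel ' ' (H.take k) with _ | m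
        · exact absurd ((lastRel_eq_none _ _).mp hx) (by simpa using hsp_mem)
        · simp [pvLastIn, lastGo_eq, lastRel, hx]
          ring

-- Key case: a leading non-terminator (including a backslash before any space)
theorem staged_other (c : Char) (r : List Char) (hc : ¬ pvTerminators.contains c = true) :
    pvStaged (c :: r) = 1 + pvStaged r := by
  have hch : ¬ pvHard.contains c = true := by
    intro h; exact hc (pv_hard_term h)
  have hcs : ¬ c = ' ' := by
    intro h; rw [h] at hc; exact hc (by decide)
  rw [staged_eq (c :: r), staged_eq r]
  have ht1 : pvFirstIn (c :: r) pvHard = pvFirstIn r pvHard + 1 := by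
    simp only [pvFirstIn]; rw [if_neg hch]; omega
  rw [ht1, List.take_succ_cons]
  set n := pvFirstIn r pvHard with hn
  set H := List.take n r with hH
  have hnlen : n ≤ r.length := firstIn_le_length r pvHard
  have hHlen : H.length = n := by rw [hH]; simp; omega
  have hsp1 : pvFirstIn (c :: H) [' '] = pvFirstIn H [' '] + 1 := by
    simp only [pvFirstIn]
    rw [if_neg (by simpa using hcs)]
    omega
  rw [hsp1, List.drop_succ_cons]
  set j := pvFirstIn H [' '] with hj
  set q := pvFirstIn (H.drop (j + 1)) ['\\'] with hq
  by_cases hjn : j = H.length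
  · have hc1 : j + 1 = (c :: H).length := by simp [hjn]
    rw [if_pos hc1, if_pos hjn]
    push_cast; omega
  · have hc1 : ¬ (j + 1 = (c :: H).length) := by simp [List.length_cons]; omega
    rw [if_neg hc1, if_neg hjn]
    have hjlt : j < n := by
      have := firstIn_le_length H [' ']
      omega
    by_cases hbn : j + 1 + q = H.length
    · have hc2 : j + 1 + 1 + q = (c :: H).length := by simp [List.length_cons]; omega
      rw [if_pos hc2, if_pos hbn]
      push_cast; omega
    · have hc2 : ¬ (j + 1 + 1 + q = (c :: H).length) := by simp [List.length_cons]; omega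
      rw [if_neg hc2, if_neg hbn]
      have ht : j + 1 + 1 + q = (j + 1 + q) + 1 := by omega
      rw [ht, List.take_succ_cons]
      have hHj : H.getD j '?' = ' ' := by
        have := getD_firstIn H [' '] (by omega)
        rwa [contains_singleton] at this
      have hble : j + 1 + q ≤ H.length := by
        have := firstIn_le_length (H.drop (j + 1)) ['\\']
        simp [hHlen] at this
        omega
      have hsp_mem : ' ' ∈ H.take (j + 1 + q) := by
        have hlen2 : j < (H.take (j + 1 + q)).length := by
          simp [hHlen]; omega
        have := mem_of_getD (H.take (j + 1 + q)) j hlen2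
        rwa [getD_take H (j + 1 + q) j (by omega), hHj] at this
      rcases hx : lastRel ' ' (H.take (j + 1 + q)) with _ | m
      · exact absurd ((lastRel_eq_none _ _).mp hx) (by simpa using hsp_mem)
      · simp [pvLastIn, lastGo_eq, lastRel, hx]
        ring

-- main induction: A's scan returns i plus B's staged answer on the rest
theorem goA_eq_staged (l : List Char) : ∀ i : Int, pvGoA l i = i + pvStaged l := by
  induction l with
  | nil => intro i; simp [pvGoA, pvStaged, pvFirstIn]
  | cons c r ih =>
    intro i
    by_cases ht : pvTerminators.contains c = true
    · by_cases hs : c = ' '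
      · subst hs
        rw [staged_space r]
        simp only [pvGoA]
        rw [if_pos ht]
        simp only [if_true]
        cases hf : followedByFraction r with
        | true => simp
        | false =>
          simp only [Bool.false_eq_true, if_false]
          rw [ih]
          ring
      · have hh : pvHard.contains c = true := pv_term_char ht hs
        simp only [pvGoA]
        rw [if_pos ht, if_neg hs, staged_hard c r hh]
        simp
    · rw [staged_other c r ht]
      simp only [pvGoA]
      rw [if_neg ht, ih]
      ring

-- ===== VERDICT (by name: the statement is the Claim_ definition above) =====
theorem findSegmentEndWithSpaces_spec : Claim_equal_findSegmentEndWithSpaces := by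
  intro s _
  unfold Spec_findSegmentEndWithSpaces findSegmentEndWithSpaces findSegmentEndWithSpaces_alt
  rw [goA_eq_staged s.toList 0]
  simp
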